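-- pv_equiv track=rewrite | github.com/97-vinash/cidr-info-tool | cidr_info.py | get_network_address
-- ===== SOURCE A (Python) =====
-- def get_network_address(ip_binary, network_prefix):
--     binary_network_address = []
--     decimal_network_address = []
--
--     count = 0
--     for i in range(4):
--         octate = ip_binary[i]
--         octate2 = ""
--         for bit in octate:
--             if count < network_prefix:
--                 octate2 += bit
--             else:
--                 octate2 += "0"
--             count += 1
--         binary_network_address.append(octate2)
--         decimal_network_address.append(int(octate2, 2))
--
--     return binary_network_address, decimal_network_address
-- ===== SOURCE B (Python) =====
-- def get_network_address(ip_binary, network_prefix):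
--     octets = ip_binary[:4]
--     bits = "".join(octets)
--     keep = max(0, min(len(bits), network_prefix))
--     masked = bits[:keep] + "0" * (len(bits) - keep)
--     binary_network_address = []
--     pos = 0
--     for o in octets:
--         binary_network_address.append(masked[pos:pos + len(o)])
--         pos += len(o)
--     return binary_network_address, [int(o, 2) for o in binary_network_address]
-- ===== Notes on version B (the rewrite author's own statement) =====
-- stated objective: simpler
-- what changed: Replaces A's nested per-bit loop with a global bit counter by one join of the octets, a clamped prefix slice plus zero padding to build the masked bit string, and a re-split on the original octet lengths.
import Mathlib
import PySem

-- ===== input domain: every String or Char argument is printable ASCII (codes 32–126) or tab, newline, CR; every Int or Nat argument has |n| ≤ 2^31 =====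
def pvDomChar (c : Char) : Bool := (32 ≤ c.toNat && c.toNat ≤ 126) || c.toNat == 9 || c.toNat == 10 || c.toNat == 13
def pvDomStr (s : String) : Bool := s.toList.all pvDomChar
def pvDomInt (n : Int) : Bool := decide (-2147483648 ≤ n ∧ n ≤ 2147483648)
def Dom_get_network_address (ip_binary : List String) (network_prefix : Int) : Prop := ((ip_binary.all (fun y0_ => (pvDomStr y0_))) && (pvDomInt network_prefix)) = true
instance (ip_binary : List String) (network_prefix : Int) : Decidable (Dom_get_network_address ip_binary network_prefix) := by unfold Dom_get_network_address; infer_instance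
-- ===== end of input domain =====

-- B replaces A's per-bit nested loop with a global bit-counter by one join / clamp / slice-mask
-- and a re-split on the original octet lengths (objective: simpler decomposition, not faster).

-- int(s, 2): exact for nonempty strings consisting only of '0'/'1' (guaranteed by Pre_).
def parseBin (cs : List Char) : Int :=
  cs.foldl (fun a c => 2 * a + (if c = '1' then 1 else 0)) 0

-- ===== PORT A =====
def get_network_address (ip_binary : List String) (network_prefix : Int) : List String × List Int :=
  let r := (PySem.List.pyRange 0 4 1).foldl
    (fun (st : List String × List Int × Int) i =>
      -- ip_binary[i]; an out-of-range index (IndexError) is excluded by Pre_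
      let octate := (PySem.List.pyGet? ip_binary i).getD ""
      let inner := octate.toList.foldl
        (fun (q : List Char × Int) bit =>
          (q.1 ++ [if q.2 < network_prefix then bit else '0'], q.2 + 1)) ([], st.2.2)
      (st.1 ++ [String.ofList inner.1], st.2.1 ++ [parseBin inner.1], inner.2))
    ([], [], 0)
  (r.1, r.2.1)

-- ===== PORT B =====
-- re-split masked back into chunks of the original octet lengths (masked[pos:pos+len(o)])
def chunksBy : List String → List Char → List String
  | [], _ => []
  | o :: r, m => String.ofList (m.take o.toList.length) :: chunksBy r (m.drop o.toList.length)

def get_network_address_alt (ip_binary : List String) (network_prefix : Int) : List String × List Int :=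
  let octets := PySem.List.slice ip_binary (some 0) (some 4)
  let bits := (octets.map String.toList).flatten
  let keep := max 0 (min (bits.length : Int) network_prefix)
  let masked := bits.take keep.toNat ++ List.replicate (bits.length - keep.toNat) '0'
  let binary := chunksBy octets masked
  (binary, binary.map (fun o => parseBin o.toList))

-- ===== PRECONDITION & SPEC =====
-- Bool check: every char of an octet that lands in the kept region (global position < prefix) is '0' or '1'
def preMask (p c : Int) : List Char → Bool
  | [] => true
  | b :: t => ((!decide (c < p)) || (b == '0' || b == '1')) && preMask p (c + 1) t

def preOcts (p c : Int) : List (List Char) → Bool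
  | [] => true
  | o :: r => (!o.isEmpty) && preMask p c o && preOcts p (c + o.length) r

-- Pre_ restricts the first four octets to the function's natural domain: at least four octets,
-- each of the first four nonempty, with every bit kept by the prefix being '0' or '1'. It thereby
-- excludes some inputs where int(octet, 2) still returns via Python literal quirks (underscores,
-- leading whitespace in kept bits), which the port does not model; A and B agree there too.
def Pre_get_network_address (ip_binary : List String) (network_prefix : Int) : Prop :=
  4 ≤ ip_binary.length ∧
  preOcts network_prefix 0 ((ip_binary.take 4).map String.toList) = true

instance (ip_binary : List String) (network_prefix : Int) : Decidable (Pre_get_network_address ip_binary network_prefix) := by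
  unfold Pre_get_network_address; infer_instance

def pvWitness_get_network_address : List String × Int := (["11000000", "10101000", "00000001", "00101010"], 24)

def Spec_get_network_address (ip_binary : List String) (network_prefix : Int) (out : List String × List Int) : Prop := out = get_network_address_alt ip_binary network_prefix
instance (ip_binary : List String) (network_prefix : Int) (out : List String × List Int) : Decidable (Spec_get_network_address ip_binary network_prefix out) := by unfold Spec_get_network_address; infer_instance

-- ===== CLAIM (what is proved, stated in full; the proofs are below) =====
def Claim_equal_get_network_address : Prop := ∀ (ip_binary : List String) (network_prefix : Int), Dom_get_network_address ip_binary network_prefix → Pre_get_network_address ip_binary network_prefix → Spec_get_network_address ip_binary network_prefix (get_network_address ip_binary network_prefix)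

-- ===== LEMMAS AND PROOFS =====

-- the masked bit string, defined positionally: keep bits at global positions < p, else '0'
def maskFrom (p c : Int) : List Char → List Char
  | [] => []
  | b :: t => (if c < p then b else '0') :: maskFrom p (c + 1) t

lemma maskFrom_length (p c : Int) (cs : List Char) : (maskFrom p c cs).length = cs.length := by
  induction cs generalizing c with
  | nil => rfl
  | cons b t ih => simp [maskFrom, ih]

lemma maskFrom_append (p c : Int) (xs ys : List Char) :
    maskFrom p c (xs ++ ys) = maskFrom p c xs ++ maskFrom p (c + xs.length) ys := by
  induction xs generalizing c with
  | nil => simp [maskFrom]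
  | cons b t ih =>
    simp [maskFrom, ih (c + 1)]
    ring_nf

lemma maskFrom_take (p c : Int) (cs : List Char) :
    maskFrom p c cs = cs.take (p - c).toNat ++ List.replicate (cs.length - (p - c).toNat) '0' := by
  induction cs generalizing c with
  | nil => simp [maskFrom]
  | cons b t ih =>
    by_cases h : c < p
    · have hk : (p - c).toNat = (p - (c + 1)).toNat + 1 := by omega
      simp [maskFrom, h, ih (c + 1), hk]
    · have hk : (p - c).toNat = 0 := by omega
      have hk1 : (p - (c + 1)).toNat = 0 := by omega
      simp [maskFrom, h, ih (c + 1), hk, hk1, List.replicate_succ]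

-- A's inner per-bit loop computes maskFrom and advances the counter by the octet length
lemma innerA (p : Int) (cs : List Char) (acc : List Char) (c : Int) :
    cs.foldl (fun (q : List Char × Int) bit =>
      (q.1 ++ [if q.2 < p then bit else '0'], q.2 + 1)) (acc, c)
    = (acc ++ maskFrom p c cs, c + cs.length) := by
  induction cs generalizing acc c with
  | nil => simp [maskFrom]
  | cons b t ih =>
    simp [maskFrom, ih (acc ++ [if c < p then b else '0']) (c + 1)]
    omega

-- B's masked bit string equals maskFrom at offset 0
lemma masked_eq (p : Int) (bits : List Char) :
    bits.take (max 0 (min (bits.length : Int) p)).toNat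
      ++ List.replicate (bits.length - (max 0 (min (bits.length : Int) p)).toNat) '0'
    = maskFrom p 0 bits := by
  rw [maskFrom_take p 0 bits]
  have h1 : bits.take (max 0 (min (bits.length : Int) p)).toNat = bits.take (p - 0).toNat := by
    by_cases h : (bits.length : Int) ≤ p
    · have : (max 0 (min (bits.length : Int) p)).toNat = bits.length := by omega
      rw [this]
      have h2 : bits.length ≤ (p - 0).toNat := by omega
      rw [List.take_of_length_le (by omega), List.take_of_length_le h2]
    · have : (max 0 (min (bits.length : Int) p)).toNat = (p - 0).toNat := by omega
      rw [this]
  have h2 : bits.length - (max 0 (min (bits.length : Int) p)).toNat = bits.length - (p - 0).toNat := by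
    omega
  rw [h1, h2]

-- the per-octet masks, each octet masked from its global bit offset
def maskOcts (p c : Int) : List String → List String
  | [] => []
  | o :: r => String.ofList (maskFrom p c o.toList) :: maskOcts p (c + o.toList.length) r

-- chunksBy splits the concatenated mask at the original octet boundaries
lemma chunksBy_mask (p : Int) (octs : List String) (c : Int) :
    chunksBy octs (maskFrom p c ((octs.map String.toList).flatten))
    = maskOcts p c octs := by
  induction octs generalizing c with
  | nil => rfl
  | cons o r ih =>
    simp only [List.map_cons, List.flatten_cons, maskFrom_append, chunksBy, maskOcts]
    rw [List.take_left' (maskFrom_length p c o.toList),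
        List.drop_left' (maskFrom_length p c o.toList), ih]

lemma pyRange04 : PySem.List.pyRange 0 4 1 = [0, 1, 2, 3] := by decide

lemma slice04 (a b c d : String) (rest : List String) :
    PySem.List.slice (a :: b :: c :: d :: rest) (some 0) (some 4) = [a, b, c, d] := by
  simp [PySem.List.slice]

theorem get_network_address_spec : Claim_equal_get_network_address := by
  intro ip p _ hpre
  obtain ⟨hlen, -⟩ := hpre
  unfold Spec_get_network_address
  rcases ip with _ | ⟨a, _ | ⟨b, _ | ⟨c, _ | ⟨d, rest⟩⟩⟩⟩ <;> simp at hlen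
  simp only [get_network_address, get_network_address_alt, pyRange04, slice04,
    List.foldl_cons, List.foldl_nil, masked_eq, chunksBy_mask]
  have h1 : (0:Int) ≤ (rest.length:Int) + 1 + 1 + 1 := by omega
  have h2 : (0:Int) ≤ (rest.length:Int) + 1 + 1 := by omega
  have h3 : (2:Int) ≤ (rest.length:Int) + 1 + 1 + 1 := by omega
  have h4 : (3:Int) ≤ (rest.length:Int) + 1 + 1 + 1 := by omega
  simp [innerA, maskOcts, PySem.List.pyGet?, PySem.List.pyIdx?, h1, h2, h3, h4]
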